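-- pv_equiv track=rewrite | github.com/Houssam93/Feature-Focus-in-Multi-Task-Learning-NLP | Code_git/MultiTaskV4SP.py | list_of_input
-- ===== SOURCE A (Python) =====
-- from itertools import product
--
-- def list_of_input(list_in):
--     a=[]
--     b=[]
--     for i in product([0,1],repeat=len(list_in)):
--         a.append(list(i))
--     for j in range(len(a)):
--         list2=a[j]
--         list3=[in1-inlist2 for in1,inlist2 in zip(list_in,list2)]
--         if -1 not in list3 and sum(list3)>0:
--             b.append(list3)
--     return b
-- ===== SOURCE B (Python) =====
-- def list_of_input(list_in):
--     # Recursive restricted enumeration: at each position only keep the choices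
--     # (subtract 0 or 1) that do not produce a -1 entry, instead of generating
--     # all 2^n masks and filtering.
--     def rec(vals):
--         if not vals:
--             return [[]]
--         head = vals[0]
--         tails = rec(vals[1:])
--         return [[head - m] + t for m in (0, 1) if head - m != -1 for t in tails]
--     return [r for r in rec(list_in) if sum(r) > 0]
-- ===== Notes on version B (the rewrite author's own statement) =====
-- stated objective: alternative
-- what changed: A materializes all 2^n masks from itertools.product and filters out results containing -1 afterwards; B recursively enumerates, at each position, only the subtraction choices that do not create a -1 entry, then filters by positive sum.
import Mathlib
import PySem

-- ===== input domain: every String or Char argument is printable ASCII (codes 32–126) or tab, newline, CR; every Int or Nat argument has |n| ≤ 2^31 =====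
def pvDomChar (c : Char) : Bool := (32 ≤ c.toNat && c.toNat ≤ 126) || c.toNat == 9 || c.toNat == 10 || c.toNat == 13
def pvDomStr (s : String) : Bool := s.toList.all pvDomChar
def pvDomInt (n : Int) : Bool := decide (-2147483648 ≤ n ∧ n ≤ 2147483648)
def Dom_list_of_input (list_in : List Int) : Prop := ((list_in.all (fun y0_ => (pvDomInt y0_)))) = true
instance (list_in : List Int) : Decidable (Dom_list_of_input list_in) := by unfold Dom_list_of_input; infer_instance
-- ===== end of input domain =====

-- B replaces A's full 2^n mask product + post-filter by a recursive enumeration that at each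
-- position only branches on the subtractions not producing a -1 entry (objective: alternative).

-- ===== PORT A =====
-- itertools.product([0,1], repeat=n), first coordinate outermost
def pvProduct01 : Nat → List (List Int)
  | 0 => [[]]
  | n + 1 => ([0, 1] : List Int).flatMap (fun x => (pvProduct01 n).map (fun r => x :: r))

def list_of_input (list_in : List Int) : List (List Int) :=
  let a := pvProduct01 list_in.length
  a.foldl (fun b list2 =>
    let list3 := List.zipWith (fun in1 inlist2 => in1 - inlist2) list_in list2
    if ((-1 : Int) ∉ list3 ∧ list3.sum > 0) then b ++ [list3] else b) []

-- ===== PORT B =====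
def pvRec : List Int → List (List Int)
  | [] => [[]]
  | head :: rest =>
    let tails := pvRec rest
    (([0, 1] : List Int).filter (fun m => head - m ≠ -1)).flatMap
      (fun m => tails.map (fun t => (head - m) :: t))

def list_of_input_alt (list_in : List Int) : List (List Int) :=
  (pvRec list_in).filter (fun r => r.sum > 0)

-- ===== PRECONDITION & SPEC =====
def Spec_list_of_input (list_in : List Int) (out : List (List Int)) : Prop := out = list_of_input_alt list_in
instance (list_in : List Int) (out : List (List Int)) : Decidable (Spec_list_of_input list_in out) := by unfold Spec_list_of_input; infer_instance

-- ===== CLAIM (what is proved, stated in full; the proofs are below) =====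
def Claim_equal_list_of_input : Prop := ∀ (list_in : List Int), Dom_list_of_input list_in → Spec_list_of_input list_in (list_of_input list_in)

-- ===== LEMMAS AND PROOFS =====

-- the (-1)-free part of the full 2^n product equals B's restricted enumeration
lemma pv_key (l : List Int) :
    ((pvProduct01 l.length).map (fun m => List.zipWith (fun a b => a - b) l m)).filter
      (fun r => decide ((-1 : Int) ∉ r)) = pvRec l := by
  induction l with
  | nil => simp [pvProduct01, pvRec]
  | cons v t ih =>
    have hne : ∀ (w : Int), w ≠ -1 → (!decide ((-1 : Int) = w)) = true := by
      intro w hw; simp; omega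
    by_cases h0 : v = (-1 : Int)
    · subst h0
      simp_all [pvProduct01, pvRec, List.flatMap_cons, List.filter_map, Function.comp_def]
      simp [← ih, List.map_map, Function.comp_def]
    · by_cases hz : v = 0
      · subst hz
        simp_all [pvProduct01, pvRec, List.flatMap_cons, List.filter_map, Function.comp_def]
        simp [← ih, List.map_map, Function.comp_def]
      · have e1 := hne v h0
        have e2 := hne (v - 1) (by omega)
        simp_all [pvProduct01, pvRec, List.flatMap_cons, List.filter_map, Function.comp_def]
        simp [← ih, List.map_map, Function.comp_def]

theorem list_of_input_spec : Claim_equal_list_of_input := by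
  intro l _
  show list_of_input l = list_of_input_alt l
  unfold list_of_input list_of_input_alt
  have hfun : (fun (b : List (List Int)) (list2 : List Int) =>
      let list3 := List.zipWith (fun in1 inlist2 => in1 - inlist2) l list2
      if ((-1 : Int) ∉ list3 ∧ list3.sum > 0) then b ++ [list3] else b)
      = (fun b x =>
          if (fun m => decide ((-1 : Int) ∉ (List.zipWith (fun a b => a - b) l m) ∧
              (List.zipWith (fun a b => a - b) l m).sum > 0)) x = true
          then b ++ [List.zipWith (fun a b => a - b) l x] else b) := by
    funext b x
    simp
  rw [hfun, PySem.List.foldl_append_if]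
  have hsplit : (fun (m : List Int) => decide ((-1 : Int) ∉ (List.zipWith (fun a b => a - b) l m) ∧
        (List.zipWith (fun a b => a - b) l m).sum > 0))
      = ((fun r => decide (r.sum > 0) && decide ((-1 : Int) ∉ r)) ∘
          (fun m => List.zipWith (fun a b => a - b) l m)) := by
    funext m
    simp [Bool.decide_and, Bool.and_comm]
  rw [hsplit]
  rw [← List.filter_map, ← List.filter_filter, pv_key l]
  simp
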